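/- GENERATED by tools/mkclosed.py from the statements of the toy program (Toy/Spec/Units/*.lean) — do not edit; re-run it when a statement changes.
   THE BOTTOM-UP COMPOSITION: every unit's contract with no hypothesis about a callee left, from the unit theorems, in a
   topological order of the hypotheses (8 units, 8 functions). -/
import Toy.ClosedSpec
import Toy.Spec.Proved.asan_register_globals
import Toy.Spec.Proved.clamp_length
import Toy.Spec.Proved.fill_buffer
import Toy.Spec.Proved.store_sum
import Toy.Spec.Proved.sub_I_65535_1
import Toy.Spec.Proved.weighted_sum
import Toy.Spec.Proved.prog_main
import Toy.Spec.Proved.run_ctors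
namespace Toy.Closed
open X86 X86.User Asan

/-- **THE COMPOSITION**: one line per unit, callees before callers. -/
theorem closed (Lay : Layout) (hLay : Lay.hi = 0x1000000) (μ : Microarch) (hμ : UserX.MicroOK μ) (u₀ : State)
    (hcode : AllCode Lay u₀) (hgiven : ProgX.Base.Closed.Contracts Lay μ u₀) : Contracts Lay μ u₀ := by
  have h_asan_register_globals := Toy.Spec.Proved.asan_register_globals_ok Lay hLay μ hμ u₀ hcode.asan_register_globals
  have h_clamp_length := Toy.Spec.Proved.clamp_length_ok Lay hLay μ hμ u₀ hcode.clamp_length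
  have h_fill_buffer := Toy.Spec.Proved.fill_buffer_ok Lay hLay μ hμ u₀ hcode.fill_buffer hgiven.memcpy hgiven.memset
  have h_store_sum := Toy.Spec.Proved.store_sum_ok Lay hLay μ hμ u₀ hcode.store_sum hgiven.asan_store1_noabort
  have h_sub_I_65535_1 := Toy.Spec.Proved.sub_I_65535_1_ok Lay hLay μ hμ u₀ hcode.sub_I_65535_1 h_asan_register_globals
  have h_weighted_sum := Toy.Spec.Proved.weighted_sum_ok Lay hLay μ hμ u₀ hcode.weighted_sum hgiven.asan_load1_noabort
  have h_prog_main := Toy.Spec.Proved.prog_main_ok Lay hLay μ hμ u₀ hcode.prog_main h_clamp_length h_fill_buffer h_weighted_sum h_store_sum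
  have h_run_ctors := Toy.Spec.Proved.run_ctors_ok Lay hLay μ hμ u₀ hcode.run_ctors h_sub_I_65535_1
  exact {
    asan_register_globals := h_asan_register_globals,
    clamp_length := h_clamp_length,
    fill_buffer := h_fill_buffer,
    store_sum := h_store_sum,
    sub_I_65535_1 := h_sub_I_65535_1,
    weighted_sum := h_weighted_sum,
    prog_main := h_prog_main,
    run_ctors := h_run_ctors
  }

end Toy.Closed
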